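-- pv_equiv track=rewrite | github.com/CyberNet-Works/progress_tracker | Python/python_competition/ifOR/spongecase.py | to_spongecase
-- ===== SOURCE A (Python) =====
-- def to_spongecase(text):
--     result = ""
--     letter_count = 0
--
--     for i, char in enumerate(text):
--         if char != " ":
--             if letter_count % 2 == 0:
--                 result += char.lower()
--             else:
--                 result += char.upper()
--             letter_count += 1
--         else:
--             result += " "
--
--     return result
-- ===== SOURCE B (Python) =====
-- def to_spongecase(text):
--     # Pass 1: materialize the cased non-space subsequence.
--     cased = [c.lower() if k % 2 == 0 else c.upper()
--              for k, c in enumerate(c for c in text if c != " ")]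
--     # Pass 2: re-insert spaces, consuming the cased sequence in order.
--     it = iter(cased)
--     return "".join(" " if c == " " else next(it) for c in text)
-- ===== Notes on version B (the rewrite author's own statement) =====
-- stated objective: alternative
-- what changed: A threads case parity and space handling through one stateful accumulator loop; B first materializes the cased non-space subsequence (filter + enumerate + map) and then rebuilds the string in a second pass that re-inserts spaces while consuming that sequence.
import Mathlib
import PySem

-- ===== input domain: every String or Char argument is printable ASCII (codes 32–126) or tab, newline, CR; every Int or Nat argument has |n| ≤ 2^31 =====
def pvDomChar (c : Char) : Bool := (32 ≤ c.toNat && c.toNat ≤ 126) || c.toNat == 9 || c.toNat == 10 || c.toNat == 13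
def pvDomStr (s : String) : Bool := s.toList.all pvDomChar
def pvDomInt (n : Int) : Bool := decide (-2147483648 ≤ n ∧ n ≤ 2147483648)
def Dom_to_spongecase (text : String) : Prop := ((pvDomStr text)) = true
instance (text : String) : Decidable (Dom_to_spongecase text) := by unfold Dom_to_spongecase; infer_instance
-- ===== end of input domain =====

-- B replaces A's single stateful accumulator loop with two passes: build the cased
-- non-space subsequence first, then re-insert spaces while consuming it (alternative decomposition).


-- ===== PORT A =====
-- one loop over the characters, state = (result so far, letter_count)
def to_spongecase (text : String) : String :=
  String.ofList
    (text.toList.foldl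
      (fun (acc : List Char × Nat) char =>
        if char ≠ ' ' then
          (acc.1 ++ [if acc.2 % 2 == 0 then PySem.Chars.lowerChar char else PySem.Chars.upperChar char],
           acc.2 + 1)
        else
          (acc.1 ++ [' '], acc.2))
      ([], 0)).1

-- ===== PORT B =====
-- pass 2 of Source B: ' ' stays, otherwise take the next element of the cased sequence
-- (the [] fallback corresponds to consuming an exhausted iterator, which never happens)
def pvRebuild : List Char → List Char → List Char
  | [], _ => []
  | c :: rest, cs =>
    if c == ' ' then ' ' :: pvRebuild rest cs
    else
      match cs with
      | [] => []
      | t :: ts => t :: pvRebuild rest ts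

def to_spongecase_alt (text : String) : String :=
  String.ofList
    (pvRebuild text.toList
      ((PySem.List.enumerate (text.toList.filter (fun c => c ≠ ' '))).map
        (fun kc => if kc.1 % 2 == 0 then PySem.Chars.lowerChar kc.2 else PySem.Chars.upperChar kc.2)))

-- ===== PRECONDITION & SPEC =====
def Spec_to_spongecase (text : String) (out : String) : Prop := out = to_spongecase_alt text
instance (text : String) (out : String) : Decidable (Spec_to_spongecase text out) := by unfold Spec_to_spongecase; infer_instance

-- ===== CLAIM (what is proved, stated in full; the proofs are below) =====
def Claim_equal_to_spongecase : Prop := ∀ (text : String), Dom_to_spongecase text → Spec_to_spongecase text (to_spongecase text)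

-- ===== LEMMAS AND PROOFS =====

-- proof-side characterisation: the cased subsequence of l with parity counter starting at k
def pvCasedFrom (k : Nat) : List Char → List Char
  | [] => []
  | c :: rest =>
    if c ≠ ' ' then
      (if k % 2 == 0 then PySem.Chars.lowerChar c else PySem.Chars.upperChar c) :: pvCasedFrom (k + 1) rest
    else pvCasedFrom k rest

-- the same over the already-filtered list (no space test)
def pvCasedOf (k : Nat) : List Char → List Char
  | [] => []
  | c :: rest =>
    (if k % 2 == 0 then PySem.Chars.lowerChar c else PySem.Chars.upperChar c) :: pvCasedOf (k + 1) rest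

lemma pvParity (k : Nat) : ((k : Int) % 2 == 0) = ((k % 2 : Nat) == 0) := by
  rcases Nat.mod_two_eq_zero_or_one k with h | h
  · have h2 : (k : Int) % 2 = 0 := by omega
    rw [h, h2]; rfl
  · have h2 : (k : Int) % 2 = 1 := by omega
    rw [h, h2]; rfl

lemma pvRebuild_space (rest cs : List Char) : pvRebuild (' ' :: rest) cs = ' ' :: pvRebuild rest cs := rfl

lemma pvRebuild_nonspace (c : Char) (h : ¬ c = ' ') (rest : List Char) (t : Char) (ts : List Char) :
    pvRebuild (c :: rest) (t :: ts) = t :: pvRebuild rest ts := by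
  simp [pvRebuild, h]

-- the enumerate+map pipeline of B equals pvCasedOf
lemma pvEnum_map_eq (l : List Char) (k : Nat) :
    (PySem.List.enumerate l (k : Int)).map
      (fun kc => if kc.1 % 2 == 0 then PySem.Chars.lowerChar kc.2 else PySem.Chars.upperChar kc.2)
    = pvCasedOf k l := by
  induction l generalizing k with
  | nil => rfl
  | cons c rest ih =>
    have h1 : (k : Int) + 1 = ((k + 1 : Nat) : Int) := by push_cast; ring
    rw [PySem.List.enumerate_cons, List.map_cons, h1, ih]
    show (if ((k : Int) % 2 == 0) = true then PySem.Chars.lowerChar c else PySem.Chars.upperChar c)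
        :: pvCasedOf (k + 1) rest = pvCasedOf k (c :: rest)
    rw [pvParity]
    rfl

-- pvCasedOf ∘ filter = pvCasedFrom
lemma pvCasedOf_filter (l : List Char) (k : Nat) :
    pvCasedOf k (l.filter (fun c => c ≠ ' ')) = pvCasedFrom k l := by
  induction l generalizing k with
  | nil => rfl
  | cons c rest ih =>
    rw [List.filter_cons]
    by_cases hc : c = ' '
    · rw [if_neg (by simp [hc])]
      rw [ih]
      rw [show pvCasedFrom k (c :: rest) = pvCasedFrom k rest by
        rw [pvCasedFrom, if_neg (by simp [hc])]]
    · rw [if_pos (by simp [hc])]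
      rw [show pvCasedOf k (c :: rest.filter (fun c => c ≠ ' '))
            = (if k % 2 == 0 then PySem.Chars.lowerChar c else PySem.Chars.upperChar c)
              :: pvCasedOf (k + 1) (rest.filter (fun c => c ≠ ' ')) from rfl]
      rw [ih]
      rw [show pvCasedFrom k (c :: rest)
            = (if k % 2 == 0 then PySem.Chars.lowerChar c else PySem.Chars.upperChar c)
              :: pvCasedFrom (k + 1) rest by rw [pvCasedFrom, if_pos hc]]

-- A's accumulator loop, characterised: it appends the rebuilt tail
lemma pvFoldA (l : List Char) (acc : List Char) (k : Nat) :
    (l.foldl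
      (fun (acc : List Char × Nat) char =>
        if char ≠ ' ' then
          (acc.1 ++ [if acc.2 % 2 == 0 then PySem.Chars.lowerChar char else PySem.Chars.upperChar char],
           acc.2 + 1)
        else (acc.1 ++ [' '], acc.2))
      (acc, k)).1 = acc ++ pvRebuild l (pvCasedFrom k l) := by
  induction l generalizing acc k with
  | nil => simp [pvRebuild]
  | cons c rest ih =>
    rw [List.foldl_cons]
    by_cases hc : c = ' '
    · rw [if_neg (by simp [hc]), ih]
      rw [show pvCasedFrom k (c :: rest) = pvCasedFrom k rest by
        rw [pvCasedFrom, if_neg (by simp [hc])]]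
      rw [hc, pvRebuild_space]
      simp
    · rw [if_pos hc, ih]
      rw [show pvCasedFrom k (c :: rest)
            = (if k % 2 == 0 then PySem.Chars.lowerChar c else PySem.Chars.upperChar c)
              :: pvCasedFrom (k + 1) rest by rw [pvCasedFrom, if_pos hc]]
      rw [show pvRebuild (c :: rest)
            ((if k % 2 == 0 then PySem.Chars.lowerChar c else PySem.Chars.upperChar c)
              :: pvCasedFrom (k + 1) rest)
            = (if k % 2 == 0 then PySem.Chars.lowerChar c else PySem.Chars.upperChar c)
              :: pvRebuild rest (pvCasedFrom (k + 1) rest) from pvRebuild_nonspace c hc rest _ _]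
      simp

-- ===== VERDICT (by name: the statement is the Claim_ definition above) =====
theorem to_spongecase_spec : Claim_equal_to_spongecase := by
  intro text _
  unfold Spec_to_spongecase to_spongecase to_spongecase_alt
  rw [pvFoldA text.toList [] 0, List.nil_append]
  have h := pvEnum_map_eq (text.toList.filter (fun c => c ≠ ' ')) 0
  rw [Nat.cast_zero] at h
  rw [h, pvCasedOf_filter]
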